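-- pv_equiv track=rewrite | github.com/akshatg20/sql-parser | to_be_modified/CollapsedTrieIndex.py | index_graduation_year_collapsed
-- ===== SOURCE A (Python) =====
-- def index_graduation_year_collapsed(years_with_ids):
-- 	"""
-- 	Sorts the graduation years and returns two things:
-- 	1. A list of student IDs sorted by graduation year.
-- 	2. A dictionary where the keys are unique graduation years and the values are the start index of the corresponding year in the sorted list.
--
-- 	This method can be used to create an index on graduation year for a list of students.
--
-- 	:param years_with_ids: List of tuples in the form ( student_id, graduation_year)
-- 	:return: sorted_ids, year_start_index
-- 	"""
--
-- 	# Sort the list of tuples based on the graduation year (second element of the tuple)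
-- 	sorted_years_with_ids = sorted(years_with_ids, key=lambda x: x[1])
--
-- 	# Extract the sorted IDs
-- 	sorted_ids = [item[0] for item in sorted_years_with_ids]
--
-- 	year_start_index = {}
-- 	for i, (_, year) in enumerate(sorted_years_with_ids):
-- 		if year not in year_start_index:
-- 			year_start_index[year] = (i, i)  # Record the first occurrence of the graduation year as (first_index, last_index)
-- 		else:
-- 			year_start_index[year] = (year_start_index[year][0], i)  # Update the last occurrence of the graduation year
--
-- 	return sorted_ids, year_start_index
-- ===== SOURCE B (Python) =====
-- def index_graduation_year_collapsed(years_with_ids):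
--     # Group contiguous equal-year runs of the sorted list: one dict write per
--     # distinct year instead of one membership-check/update per element.
--     s = sorted(years_with_ids, key=lambda x: x[1])
--     sorted_ids = [sid for sid, _ in s]
--     year_start_index = {}
--     n = len(s)
--     i = 0
--     while i < n:
--         year = s[i][1]
--         j = i + 1
--         while j < n and s[j][1] == year:
--             j += 1
--         year_start_index[year] = (i, j - 1)
--         i = j
--     return sorted_ids, year_start_index
-- ===== Notes on version B (the rewrite author's own statement) =====
-- stated objective: alternative
-- what changed: Replaces the per-element dict membership-check/update loop over enumerate with run-length grouping of the sorted list: one pass that emits a single (first,last) index pair per contiguous equal-year run.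
import Mathlib
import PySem

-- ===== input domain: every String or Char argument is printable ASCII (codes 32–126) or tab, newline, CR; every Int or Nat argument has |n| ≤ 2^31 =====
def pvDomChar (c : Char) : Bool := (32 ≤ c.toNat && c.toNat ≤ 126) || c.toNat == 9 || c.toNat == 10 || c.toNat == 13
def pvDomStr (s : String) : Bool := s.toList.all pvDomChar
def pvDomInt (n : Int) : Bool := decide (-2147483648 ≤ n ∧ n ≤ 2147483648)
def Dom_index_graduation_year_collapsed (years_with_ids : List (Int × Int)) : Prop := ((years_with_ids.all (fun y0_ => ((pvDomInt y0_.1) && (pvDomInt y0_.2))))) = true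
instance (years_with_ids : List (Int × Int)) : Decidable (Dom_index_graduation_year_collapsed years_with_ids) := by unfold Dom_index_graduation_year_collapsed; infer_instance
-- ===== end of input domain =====

-- B groups the sorted list into contiguous equal-year runs (one dict entry per run)
-- instead of A's per-element membership-check/update loop; return value only, same cost class.


-- ===== PORT A =====
-- loop body of A's 'for i, (_, year) in enumerate(...)'
def igycStep (d : PySem.Dict Int (Int × Int)) (p : Int × (Int × Int)) : PySem.Dict Int (Int × Int) :=
  match d.get? p.2.2 with
  | none => d.insert p.2.2 (p.1, p.1)          -- first occurrence: (i, i)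
  | some v => d.insert p.2.2 (v.1, p.1)        -- update last occurrence

def index_graduation_year_collapsed (years_with_ids : List (Int × Int)) : List Int × (List (Int × Int × Int)) :=
  let sorted_years_with_ids := PySem.List.sorted years_with_ids (fun x => x.2)
  let sorted_ids := sorted_years_with_ids.map (fun item => item.1)
  let year_start_index := (PySem.List.enumerate sorted_years_with_ids).foldl igycStep PySem.Dict.empty
  (sorted_ids, year_start_index.items)

-- ===== PORT B =====
-- Source B's outer while loop: for each contiguous equal-year run starting at index i,
-- record (i, i + run_length - 1) and continue after the run.
def igycRuns (i : Int) (s : List (Int × Int)) : List (Int × Int × Int) :=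
  match s with
  | [] => []
  | (_, y) :: rest =>
      let grp := rest.takeWhile (fun p => p.2 == y)
      let rest' := rest.dropWhile (fun p => p.2 == y)
      (y, i, i + grp.length) :: igycRuns (i + grp.length + 1) rest'
termination_by s.length
decreasing_by
  simp only [List.length_cons]
  exact Nat.lt_succ_of_le (List.length_dropWhile_le _ _)

def index_graduation_year_collapsed_alt (years_with_ids : List (Int × Int)) : List Int × (List (Int × Int × Int)) :=
  let s := PySem.List.sorted years_with_ids (fun x => x.2)
  (s.map (fun p => p.1), igycRuns 0 s)

-- ===== PRECONDITION & SPEC =====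
def Spec_index_graduation_year_collapsed (years_with_ids : List (Int × Int)) (out : List Int × (List (Int × Int × Int))) : Prop := out = index_graduation_year_collapsed_alt years_with_ids
instance (years_with_ids : List (Int × Int)) (out : List Int × (List (Int × Int × Int))) : Decidable (Spec_index_graduation_year_collapsed years_with_ids out) := by unfold Spec_index_graduation_year_collapsed; infer_instance

-- ===== CLAIM (what is proved, stated in full; the proofs are below) =====
def Claim_equal_index_graduation_year_collapsed : Prop := ∀ (years_with_ids : List (Int × Int)), Dom_index_graduation_year_collapsed years_with_ids → Spec_index_graduation_year_collapsed years_with_ids (index_graduation_year_collapsed years_with_ids)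

-- ===== LEMMAS AND PROOFS =====

-- one-step unfolding of igycRuns
theorem igycRuns_cons (i : Int) (a y : Int) (rest : List (Int × Int)) :
    igycRuns i ((a, y) :: rest) =
      (y, i, i + (rest.takeWhile (fun p => p.2 == y)).length) ::
        igycRuns (i + (rest.takeWhile (fun p => p.2 == y)).length + 1)
          (rest.dropWhile (fun p => p.2 == y)) := by
  rw [igycRuns]

-- Processing a run whose year is already in the dict only updates that key's last index.
theorem igyc_run (y : Int) (grp : List (Int × Int)) (hgrp : ∀ p ∈ grp, p.2 = y) :
    ∀ (j : Int) (d : PySem.Dict Int (Int × Int)) (v : Int × Int), d.get? y = some v →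
    (PySem.List.enumerate grp j).foldl igycStep d =
      if grp = [] then d else d.insert y (v.1, j + grp.length - 1) := by
  induction grp with
  | nil => intro j d v hv; simp [PySem.List.enumerate_nil]
  | cons b t ih =>
      intro j d v hv
      have hb : b.2 = y := hgrp b (by simp)
      have hstep : igycStep d (j, b) = d.insert y (v.1, j) := by
        simp [igycStep, hb, hv]
      rw [PySem.List.enumerate_cons, List.foldl_cons, hstep]
      have hv' : (d.insert y (v.1, j)).get? y = some (v.1, j) :=
        PySem.Dict.get?_insert_self d y (v.1, j)
      rw [ih (fun p hp => hgrp p (by simp [hp])) (j + 1) _ _ hv']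
      by_cases ht : t = []
      · simp [ht]
      · rw [if_neg ht, PySem.Dict.insert_insert_self,
          if_neg (show ¬ (b :: t = []) from by simp)]
        simp only [List.length_cons]
        congr 2
        push_cast
        ring

-- Suffix after dropping the leading y-run contains no year equal to y
-- (years are sorted, so once a different (larger) year appears, y never recurs).
theorem igyc_drop_ne (y : Int) :
    ∀ (rest : List (Int × Int)), rest.Pairwise (fun a b => a.2 ≤ b.2) →
    (∀ q ∈ rest, y ≤ q.2) →
    ∀ p ∈ rest.dropWhile (fun p => p.2 == y), p.2 ≠ y := by
  intro rest
  induction rest with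
  | nil => simp
  | cons h t ih =>
      intro hpw hle p hp
      by_cases hy : h.2 = y
      · rw [List.dropWhile_cons_of_pos (by simp [hy])] at hp
        exact ih hpw.of_cons (fun q hq => hle q (by simp [hq])) p hp
      · rw [List.dropWhile_cons_of_neg (by simp [hy])] at hp
        rcases List.mem_cons.mp hp with rfl | hp'
        · exact hy
        · have h1 : y ≤ h.2 := hle h (by simp)
          have h2 : h.2 ≤ p.2 := (List.pairwise_cons.mp hpw).1 p hp'
          intro hc; omega

-- Main invariant: folding A's loop over a sorted list with all years fresh in d
-- appends exactly B's run records.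
theorem igyc_main (s : List (Int × Int)) (hpw : s.Pairwise (fun a b => a.2 ≤ b.2)) :
    ∀ (i : Int) (d : PySem.Dict Int (Int × Int)),
    (∀ p ∈ s, d.contains p.2 = false) →
    ((PySem.List.enumerate s i).foldl igycStep d).items = d.items ++ igycRuns i s := by
  match s with
  | [] => intro i d _; simp [PySem.List.enumerate_nil, igycRuns]
  | (a, y) :: rest =>
    intro i d hfresh
    have hsplit : rest = rest.takeWhile (fun p => p.2 == y) ++ rest.dropWhile (fun p => p.2 == y) :=
      (List.takeWhile_append_dropWhile).symm
    have hgrp_y : ∀ p ∈ rest.takeWhile (fun p => p.2 == y), p.2 = y := by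
      intro p hp
      have := List.mem_takeWhile_imp hp
      simpa using this
    have hrest_pw : rest.Pairwise (fun a b => a.2 ≤ b.2) := (List.pairwise_cons.mp hpw).2
    have hhead_le : ∀ q ∈ rest, y ≤ q.2 := fun q hq => (List.pairwise_cons.mp hpw).1 q hq
    have hne : ∀ p ∈ rest.dropWhile (fun p => p.2 == y), p.2 ≠ y :=
      igyc_drop_ne y rest hrest_pw hhead_le
    have hyfresh : d.contains y = false := hfresh (a, y) (by simp)
    have hget : d.get? y = none := by
      rw [PySem.Dict.get?_eq_none_iff_contains, hyfresh]
    -- unfold one step of the fold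
    rw [PySem.List.enumerate_cons, List.foldl_cons]
    have hstep : igycStep d (i, (a, y)) = d.insert y (i, i) := by
      simp [igycStep, hget]
    rw [hstep]
    conv_lhs => rw [hsplit]
    rw [PySem.List.enumerate_append, List.foldl_append]
    -- the leading run with year y
    have hrun := igyc_run y (rest.takeWhile (fun p => p.2 == y)) hgrp_y (i + 1)
      (d.insert y (i, i)) (i, i) (PySem.Dict.get?_insert_self d y (i, i))
    rw [hrun]
    have hd2 : (if rest.takeWhile (fun p => p.2 == y) = [] then d.insert y (i, i)
        else (d.insert y (i, i)).insert y
          (i, i + 1 + (rest.takeWhile (fun p => p.2 == y)).length - 1)) =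
        d.insert y (i, i + (rest.takeWhile (fun p => p.2 == y)).length) := by
      by_cases hg : rest.takeWhile (fun p => p.2 == y) = []
      · simp [hg]
      · rw [if_neg hg, PySem.Dict.insert_insert_self]
        congr 2
        ring
    rw [hd2]
    -- recursive call on the strictly shorter suffix
    have hfresh' : ∀ p ∈ rest.dropWhile (fun p => p.2 == y),
        (d.insert y (i, i + (rest.takeWhile (fun p => p.2 == y)).length)).contains p.2 = false := by
      intro p hp
      rw [PySem.Dict.contains_insert]
      have h1 : d.contains p.2 = false :=
        hfresh p (List.mem_cons_of_mem _ (by rw [hsplit]; exact List.mem_append_right _ hp))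
      have h2 : p.2 ≠ y := hne p hp
      simp [h1, h2]
    have hpw' : (rest.dropWhile (fun p => p.2 == y)).Pairwise (fun a b => a.2 ≤ b.2) :=
      hrest_pw.sublist (List.dropWhile_sublist _)
    have hrec := igyc_main (rest.dropWhile (fun p => p.2 == y)) hpw'
      (i + 1 + (rest.takeWhile (fun p => p.2 == y)).length)
      (d.insert y (i, i + (rest.takeWhile (fun p => p.2 == y)).length)) hfresh'
    rw [hrec]
    -- assemble
    rw [PySem.Dict.items_insert_of_not_contains _ _ hyfresh]
    have heq : i + 1 + ((rest.takeWhile (fun p => p.2 == y)).length : Int) =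
        i + ((rest.takeWhile (fun p => p.2 == y)).length : Int) + 1 := by ring
    rw [heq, igycRuns_cons, List.append_assoc, List.singleton_append]
termination_by s.length
decreasing_by
  simp only [List.length_cons]
  exact Nat.lt_succ_of_le (List.length_dropWhile_le _ _)

-- ===== VERDICT (by name: the statement is the Claim_ definition above) =====
theorem index_graduation_year_collapsed_spec : Claim_equal_index_graduation_year_collapsed := by
  intro xs _
  unfold Spec_index_graduation_year_collapsed index_graduation_year_collapsed index_graduation_year_collapsed_alt
  simp only
  refine Prod.ext rfl ?_
  have := igyc_main (PySem.List.sorted xs (fun x => x.2))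
    (PySem.List.sorted_pairwise xs (fun x => x.2)) 0 PySem.Dict.empty (fun p _ => rfl)
  simpa using this
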